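-- pv_equiv track=rewrite | github.com/pseudocoder10/Lockout-Bot | utils/updation.py | round_score
-- ===== SOURCE A (Python) =====
-- from functools import cmp_to_key
-- from collections import namedtuple
--
-- def round_score(users, status, times):
--     def comp(a, b):
--         if a[0] > b[0]:
--             return -1
--         if a[0] < b[0]:
--             return 1
--         if a[1] == b[1]:
--             return 0
--         return -1 if a[1] < b[1] else 1
--
--     ranks = [[status[i], times[i], users[i]] for i in range(len(status))]
--     ranks.sort(key=cmp_to_key(comp))
--     res = []
--
--     for user in ranks:
--         User = namedtuple("User", "id points rank")
--         # user points rank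
--         res.append(User(user[2], user[0], [[x[0], x[1]] for x in ranks].index([user[0], user[1]]) + 1))
--     return res
-- ===== SOURCE B (Python) =====
-- from collections import namedtuple
--
-- User = namedtuple("User", "id points rank")
--
-- def round_score(users, status, times):
--     rows = sorted(zip(status, times, users), key=lambda r: (-r[0], r[1]))
--     res = []
--     prev = None
--     rank = 0
--     for i, (p, t, uid) in enumerate(rows):
--         if (p, t) != prev:
--             rank = i + 1
--             prev = (p, t)
--         res.append(User(uid, p, rank))
--     return res
-- ===== Notes on version B (the rewrite author's own statement) =====
-- stated objective: faster
-- what changed: A recomputes each rank by rebuilding the projected list and calling .index (a quadratic rescan per element); B sorts once and assigns ranks in a single carry-forward pass over the sorted rows, reusing the previous rank on (points,time) ties.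
import Mathlib
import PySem

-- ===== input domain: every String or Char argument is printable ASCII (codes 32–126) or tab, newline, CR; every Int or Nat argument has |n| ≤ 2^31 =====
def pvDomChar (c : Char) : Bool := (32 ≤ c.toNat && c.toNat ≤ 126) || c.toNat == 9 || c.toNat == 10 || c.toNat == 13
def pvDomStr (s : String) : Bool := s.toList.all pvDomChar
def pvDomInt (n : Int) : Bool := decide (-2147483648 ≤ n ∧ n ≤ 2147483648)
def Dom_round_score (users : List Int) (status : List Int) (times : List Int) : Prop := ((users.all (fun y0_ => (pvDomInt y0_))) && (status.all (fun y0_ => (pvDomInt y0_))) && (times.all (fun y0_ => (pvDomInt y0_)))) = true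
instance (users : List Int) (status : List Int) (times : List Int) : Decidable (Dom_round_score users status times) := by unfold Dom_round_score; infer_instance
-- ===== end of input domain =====

-- B replaces A's per-element .index rescans (with a projected list rebuilt each time)
-- by one stable sort plus a single carry-forward pass assigning ranks; measured faster on large inputs.


-- ===== PORT A =====
-- the sort key corresponding to A's comparator `comp` (points descending, time ascending,
-- exact ties equal): Python-tuple (lexicographic) comparison of (-points, time)
def pvKey (r : Int × Int × Int) : Lex (Int × Int) := toLex (-r.1, r.2.1)

-- the projection `[x[0], x[1]]` used by A's inner comprehension
def pvPT (x : Int × Int × Int) : Int × Int := (x.1, x.2.1)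

def round_score (users : List Int) (status : List Int) (times : List Int) : List (Int × Int × Int) :=
  -- ranks = [[status[i], times[i], users[i]] for i in range(len(status))]; ranks.sort(key=cmp_to_key(comp))
  let ranks := PySem.List.sorted
    ((PySem.List.pyRange 0 status.length 1).map (fun i =>
      (PySem.List.pyGetD status i 0, PySem.List.pyGetD times i 0, PySem.List.pyGetD users i 0)))
    pvKey
  -- res.append(User(user[2], user[0], [[x[0],x[1]] for x in ranks].index([user[0],user[1]]) + 1))
  ranks.map (fun u =>
    (u.2.2, u.1, (((PySem.List.index? (ranks.map pvPT) (pvPT u)).getD 0 : Nat) : Int) + 1))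

-- ===== PORT B =====
-- the carry-forward rank pass: i is the enumerate counter, prev the previous (points, time), rank the last rank
def pvAssign : List (Int × Int × Int) → Nat → Option (Int × Int) → Int → List (Int × Int × Int)
  | [], _, _, _ => []
  | (p, t, uid) :: rest, i, prev, rank =>
    if some (p, t) = prev then
      (uid, p, rank) :: pvAssign rest (i + 1) prev rank
    else
      (uid, p, (i : Int) + 1) :: pvAssign rest (i + 1) (some (p, t)) ((i : Int) + 1)

def round_score_alt (users : List Int) (status : List Int) (times : List Int) : List (Int × Int × Int) :=
  pvAssign (PySem.List.sorted (status.zip (times.zip users)) pvKey) 0 none 0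

-- ===== PRECONDITION & SPEC =====
-- A indexes times[i] and users[i] for every i < len(status): it raises IndexError unless both
-- lists are at least as long as status; Pre_ excludes exactly those crashes.
def Pre_round_score (users : List Int) (status : List Int) (times : List Int) : Prop :=
  status.length ≤ users.length ∧ status.length ≤ times.length
instance (users : List Int) (status : List Int) (times : List Int) : Decidable (Pre_round_score users status times) := by unfold Pre_round_score; infer_instance

def pvWitness_round_score : List Int × List Int × List Int := ([7, 5], [3, 3], [10, 2])

def Spec_round_score (users : List Int) (status : List Int) (times : List Int) (out : List (Int × Int × Int)) : Prop := out = round_score_alt users status times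
instance (users : List Int) (status : List Int) (times : List Int) (out : List (Int × Int × Int)) : Decidable (Spec_round_score users status times out) := by unfold Spec_round_score; infer_instance

-- ===== CLAIM (what is proved, stated in full; the proofs are below) =====
def Claim_equal_round_score : Prop := ∀ (users : List Int) (status : List Int) (times : List Int), Dom_round_score users status times → Pre_round_score users status times → Spec_round_score users status times (round_score users status times)

-- ===== LEMMAS AND PROOFS =====

-- equal pvKeys are equal pvPT pairs
lemma pvKey_eq_iff (a b : Int × Int × Int) : pvKey a = pvKey b ↔ pvPT a = pvPT b := by
  simp [pvKey, pvPT, Prod.ext_iff, toLex]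

-- under Pre_, A's index-built triple list is B's three-way zip
lemma build_eq (users status times : List Int)
    (h1 : status.length ≤ users.length) (h2 : status.length ≤ times.length) :
    (PySem.List.pyRange 0 status.length 1).map (fun i =>
      (PySem.List.pyGetD status i 0, PySem.List.pyGetD times i 0, PySem.List.pyGetD users i 0))
    = status.zip (times.zip users) := by
  apply List.ext_getElem
  · simp [PySem.List.length_pyRange_one]
    omega
  · intro i hi1 hi2
    have hl : i < status.length := by
      simpa [PySem.List.length_pyRange_one] using hi1
    simp only [List.getElem_map, PySem.List.getElem_pyRange_one, List.getElem_zip]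
    rw [PySem.List.pyGetD_eq_getElem status 0 (by omega) (by omega),
        PySem.List.pyGetD_eq_getElem times 0 (by omega) (by omega),
        PySem.List.pyGetD_eq_getElem users 0 (by omega) (by omega)]
    simp

-- first index of v in l ++ v :: t when v ∉ l
lemma index?_middle {l t : List (Int × Int)} {v : Int × Int} (hv : v ∉ l) :
    PySem.List.index? (l ++ v :: t) v = some l.length := by
  rw [PySem.List.index?_eq_some_iff]
  exact ⟨l, t, rfl, rfl, hv⟩

-- the carry-forward pass computes A's first-index ranks on any key-sorted list
lemma assign_eq (L P : List (Int × Int × Int)) (prev : Option (Int × Int)) (rank : Int)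
    (hs : (P ++ L).Pairwise (fun a b => pvKey a ≤ pvKey b))
    (hinv : (prev = none ∧ P = []) ∨
      (∃ x, P.getLast? = some x ∧ prev = some (pvPT x) ∧
        rank = (((PySem.List.index? (P.map pvPT) (pvPT x)).getD 0 : Nat) : Int) + 1)) :
    pvAssign L P.length prev rank
    = L.map (fun u =>
        (u.2.2, u.1, (((PySem.List.index? ((P ++ L).map pvPT) (pvPT u)).getD 0 : Nat) : Int) + 1)) := by
  induction L generalizing P prev rank with
  | nil => simp [pvAssign]
  | cons u L' ih =>
    obtain ⟨p, t, uid⟩ := u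
    by_cases hc : some (p, t) = prev
    · -- same (points, time) as the previous row: reuse the carried rank
      rcases hinv with ⟨hp, _⟩ | ⟨x, hlast, hprev, hrank⟩
      · rw [hp] at hc; exact absurd hc (by simp)
      have hx : pvPT x = (p, t) := by
        rw [hprev] at hc
        exact (Option.some_injective _ hc).symm
      have hptu : pvPT (p, t, uid) = (p, t) := rfl
      rw [hx] at hprev hrank
      have hmem : (p, t) ∈ P.map pvPT := by
        obtain ⟨P0, rfl⟩ := List.getLast?_eq_some_iff.mp hlast
        simp [← hx]
      have hidxP : PySem.List.index? ((P ++ (p, t, uid) :: L').map pvPT) (p, t)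
          = PySem.List.index? (P.map pvPT) (p, t) := by
        rw [List.map_append]
        exact PySem.List.index?_append_of_mem _ hmem
      simp only [pvAssign, if_pos hc, List.map_cons]
      refine List.cons_eq_cons.mpr ⟨?_, ?_⟩
      · simp only [pvPT] at hidxP ⊢
        rw [hidxP, hrank]
      · have hs' : ((P ++ [(p, t, uid)]) ++ L').Pairwise (fun a b => pvKey a ≤ pvKey b) := by
          simpa [List.append_assoc] using hs
        have hrank' : rank =
            (((PySem.List.index? ((P ++ [(p, t, uid)]).map pvPT) (pvPT (p, t, uid))).getD 0 : Nat) : Int) + 1 := by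
          rw [hptu, List.map_append, PySem.List.index?_append_of_mem _ hmem, hrank]
        have h := ih (P ++ [(p, t, uid)]) prev rank hs'
          (Or.inr ⟨(p, t, uid), List.getLast?_concat, by rw [hprev, hptu], hrank'⟩)
        simpa [List.length_append, List.append_assoc] using h
    · -- new (points, time): its first index in the sorted list is the current position
      have hnot : (p, t) ∉ P.map pvPT := by
        rcases hinv with ⟨_, hP⟩ | ⟨x, hlast, hprev, _⟩
        · simp [hP]
        obtain ⟨P0, rfl⟩ := List.getLast?_eq_some_iff.mp hlast
        have hxne : pvPT x ≠ (p, t) := fun h => hc (by rw [hprev, h])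
        intro hmem
        obtain ⟨y, hy, hyp⟩ := List.mem_map.mp hmem
        rcases List.mem_append.mp hy with hy0 | hyx
        · have hs2 : (P0 ++ x :: (p, t, uid) :: L').Pairwise (fun a b => pvKey a ≤ pvKey b) := by
            simpa [List.append_assoc] using hs
          rw [List.pairwise_append] at hs2
          obtain ⟨_, h2, h3⟩ := hs2
          have ryx : pvKey y ≤ pvKey x := h3 y hy0 x (by simp)
          have ryu : pvKey x ≤ pvKey (p, t, uid) := (List.pairwise_cons.mp h2).1 (p, t, uid) (by simp)
          have hky : pvKey y = pvKey (p, t, uid) := pvKey_eq_iff _ _ |>.mpr (by simpa [pvPT] using hyp)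
          have : pvKey x = pvKey (p, t, uid) := le_antisymm ryu (hky ▸ ryx)
          exact hxne (by simpa [pvPT] using (pvKey_eq_iff _ _).mp this)
        · have : y = x := by simpa using hyx
          exact hxne (this ▸ hyp)
      have hidx : PySem.List.index? ((P ++ (p, t, uid) :: L').map pvPT) (p, t)
          = some P.length := by
        rw [List.map_append, List.map_cons]
        simpa [pvPT] using index?_middle (l := P.map pvPT) (t := L'.map pvPT) (v := (p, t)) hnot
      simp only [pvAssign, if_neg hc, List.map_cons]
      refine List.cons_eq_cons.mpr ⟨?_, ?_⟩
      · simp only [pvPT] at hidx ⊢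
        rw [hidx]
        rfl
      · have hs' : ((P ++ [(p, t, uid)]) ++ L').Pairwise (fun a b => pvKey a ≤ pvKey b) := by
          simpa [List.append_assoc] using hs
        have hrank' : ((P.length : Int) + 1) =
            (((PySem.List.index? ((P ++ [(p, t, uid)]).map pvPT) (pvPT (p, t, uid))).getD 0 : Nat) : Int) + 1 := by
          rw [show pvPT (p, t, uid) = (p, t) from rfl, List.map_append]
          rw [show ((([(p, t, uid)] : List (Int × Int × Int)).map pvPT)) = [(p, t)] from rfl]
          rw [PySem.List.index?_append_singleton_self _ _ hnot]
          simp
        have h := ih (P ++ [(p, t, uid)]) (some (p, t)) ((P.length : Int) + 1) hs'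
          (Or.inr ⟨(p, t, uid), List.getLast?_concat, rfl, hrank'⟩)
        simpa [List.length_append, List.append_assoc] using h

-- ===== VERDICT (by name: the statement is the Claim_ definition above) =====
theorem round_score_spec : Claim_equal_round_score := by
  intro users status times _ hpre
  unfold Spec_round_score round_score round_score_alt
  rw [build_eq users status times hpre.1 hpre.2]
  have h := assign_eq (PySem.List.sorted (status.zip (times.zip users)) pvKey) [] none 0
    (by simpa using PySem.List.sorted_pairwise _ _) (Or.inl ⟨rfl, rfl⟩)
  simpa using h.symm
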